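-- pv_equiv track=rewrite | github.com/BasicCode/Crypto1 | cipher2.py | estimatedBest
-- ===== SOURCE A (Python) =====
-- def estimatedBest(decoded_texts, scores):
-- 	#first find the max and min values
-- 	min = 0
-- 	for i in range(0, len(scores)):
-- 		if scores[i] < scores[min]:
-- 			min = i
-- 	max = min
-- 	for i in range(0, len(scores)):
-- 		if scores[i] > scores[max]:
-- 			max = i
-- 	#get the top results within 'range' of the maximum
-- 	ret_val = []
-- 	distance = 5
-- 	for i in range(0, len(scores)):
-- 		if scores[i] > (scores[max] - distance):
-- 			ret_val.append(i)
--
-- 	#Now sort the short list in highest to lowest quality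
-- 	for i in range(0, len(ret_val)):
-- 		for j in range(0, len(ret_val) - 1):
-- 			temp_val = ret_val[j + 1]
-- 			if scores[temp_val] < scores[ret_val[j]]:
-- 				ret_val[j + 1] = ret_val[j]
-- 				ret_val[j] = temp_val
--
-- 	return ret_val
-- ===== SOURCE B (Python) =====
-- def estimatedBest(decoded_texts, scores):
--     if not scores:
--         return []
--     # one stable global sort of all indices, ascending by score
--     order = sorted(range(len(scores)), key=lambda i: scores[i])
--     threshold = scores[order[-1]] - 5
--     # qualifying indices form a contiguous suffix of the ascending order
--     k = 0
--     while k < len(order) and scores[order[k]] <= threshold: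
--         k += 1
--     return order[k:]
-- ===== Notes on version B (the rewrite author's own statement) =====
-- stated objective: faster
-- what changed: A finds the max by two scans, filters indices within 5 of it, then bubble-sorts the filtered subset with an index-swapping double loop; B performs one global stable sort of all indices by score and returns the qualifying contiguous suffix found by a single boundary scan.
import Mathlib
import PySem

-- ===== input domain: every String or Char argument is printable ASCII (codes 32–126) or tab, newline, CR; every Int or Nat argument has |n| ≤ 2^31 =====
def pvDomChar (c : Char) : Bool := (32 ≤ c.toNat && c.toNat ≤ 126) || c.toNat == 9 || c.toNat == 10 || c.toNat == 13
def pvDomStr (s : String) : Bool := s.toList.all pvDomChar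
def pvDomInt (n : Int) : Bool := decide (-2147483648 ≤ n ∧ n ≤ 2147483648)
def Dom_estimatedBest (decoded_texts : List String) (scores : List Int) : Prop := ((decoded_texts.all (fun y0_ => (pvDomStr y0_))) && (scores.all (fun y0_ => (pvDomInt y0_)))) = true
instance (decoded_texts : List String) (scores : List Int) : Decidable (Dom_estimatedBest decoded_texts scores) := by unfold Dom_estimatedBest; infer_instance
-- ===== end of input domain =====

-- B replaces A's find-max + filter + bubble-sort-of-subset by one global stable sort of all
-- indices followed by a boundary scan that returns the qualifying suffix (objective: faster; measured).


-- ===== PORT A =====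
def estimatedBest (decoded_texts : List String) (scores : List Int) : List Int :=
  let n : Int := scores.length
  -- min = 0; for i in range(0, len(scores)): if scores[i] < scores[min]: min = i
  let mn : Int := (PySem.List.pyRange 0 n 1).foldl (fun mn i =>
    if PySem.List.pyGetD scores i 0 < PySem.List.pyGetD scores mn 0 then i else mn) 0
  -- max = min; for i in range(0, len(scores)): if scores[i] > scores[max]: max = i
  let mx : Int := (PySem.List.pyRange 0 n 1).foldl (fun mx i =>
    if PySem.List.pyGetD scores i 0 > PySem.List.pyGetD scores mx 0 then i else mx) mn
  -- ret_val = []; distance = 5; append i when scores[i] > scores[max] - distance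
  let ret_val : List Int := (PySem.List.pyRange 0 n 1).foldl (fun acc i =>
    if PySem.List.pyGetD scores i 0 > PySem.List.pyGetD scores mx 0 - 5 then acc ++ [i] else acc) []
  -- double loop: bubble sort of ret_val by score (adjacent conditional swaps)
  (PySem.List.pyRange 0 (ret_val.length : Int) 1).foldl (fun rv _ =>
    (PySem.List.pyRange 0 ((rv.length : Int) - 1) 1).foldl (fun rv j =>
      let temp_val := PySem.List.pyGetD rv (j + 1) 0
      if PySem.List.pyGetD scores temp_val 0 < PySem.List.pyGetD scores (PySem.List.pyGetD rv j 0) 0 then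
        PySem.List.pySetD (PySem.List.pySetD rv (j + 1) (PySem.List.pyGetD rv j 0)) j temp_val
      else rv) rv) ret_val

-- ===== PORT B =====
-- while k < len(order) and scores[order[k]] <= threshold: k += 1   (returns the final k)
def ebScan (scores : List Int) (threshold : Int) (order : List Int) (k : Nat) : Nat :=
  if h : k < order.length then
    if PySem.List.pyGetD scores (PySem.List.pyGetD order (k : Int) 0) 0 ≤ threshold then
      ebScan scores threshold order (k + 1)
    else k
  else k
termination_by order.length - k

def estimatedBest_alt (decoded_texts : List String) (scores : List Int) : List Int :=
  if scores = [] then []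
  else
    let order := PySem.List.sorted (PySem.List.pyRange 0 (scores.length : Int) 1)
      (fun i => PySem.List.pyGetD scores i 0) false
    let threshold := PySem.List.pyGetD scores (PySem.List.pyGetD order (-1) 0) 0 - 5
    PySem.List.slice order (some ((ebScan scores threshold order 0 : Nat) : Int)) none

-- ===== PRECONDITION & SPEC =====
def Spec_estimatedBest (decoded_texts : List String) (scores : List Int) (out : List Int) : Prop := out = estimatedBest_alt decoded_texts scores
instance (decoded_texts : List String) (scores : List Int) (out : List Int) : Decidable (Spec_estimatedBest decoded_texts scores out) := by unfold Spec_estimatedBest; infer_instance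

-- ===== CLAIM (what is proved, stated in full; the proofs are below) =====
def Claim_equal_estimatedBest : Prop := ∀ (decoded_texts : List String) (scores : List Int), Dom_estimatedBest decoded_texts scores → Spec_estimatedBest decoded_texts scores (estimatedBest decoded_texts scores)

-- ===== LEMMAS AND PROOFS =====

-- score of an index (the sort key of both programs)
def skey (scores : List Int) (i : Int) : Int := PySem.List.pyGetD scores i 0

-- strict lexicographic order (score, then index): the order in which both results are strictly increasing
def Rlex (scores : List Int) (a b : Int) : Prop :=
  skey scores a < skey scores b ∨ (skey scores a = skey scores b ∧ a < b)

-- one bubble pass, recursively: passAux scores x t runs the adjacent-swap pass, x the current left element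
def passAux (scores : List Int) : Int → List Int → List Int
  | x, [] => [x]
  | x, b :: t => if skey scores b < skey scores x then b :: passAux scores x t else x :: passAux scores b t

def pass (scores : List Int) : List Int → List Int
  | [] => []
  | x :: t => passAux scores x t

theorem passAux_perm (scores : List Int) : ∀ (t : List Int) (x : Int),
    (passAux scores x t).Perm (x :: t) := by
  intro t
  induction t with
  | nil => intro x; simp [passAux]
  | cons b t ih =>
    intro x
    simp only [passAux]
    split
    · exact (List.Perm.cons b (ih x)).trans (List.Perm.swap x b t)
    · exact List.Perm.cons x (ih b)

theorem pass_perm (scores : List Int) (l : List Int) : (pass scores l).Perm l := by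
  cases l with
  | nil => exact List.Perm.nil
  | cons x t => exact passAux_perm scores t x

theorem iter_perm (scores : List Int) (k : Nat) : ∀ (l : List Int),
    ((pass scores)^[k] l).Perm l := by
  induction k with
  | zero => intro l; simp
  | succ k ih =>
    intro l
    rw [Function.iterate_succ_apply]
    exact (ih (pass scores l)).trans (pass_perm scores l)

theorem passAux_Q (scores : List Int) : ∀ (t : List Int) (x : Int),
    (x :: t).Pairwise (fun a b => skey scores a = skey scores b → a < b) →
    (passAux scores x t).Pairwise (fun a b => skey scores a = skey scores b → a < b) := by
  intro t
  induction t with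
  | nil => intro x _; simp [passAux]
  | cons b t ih =>
    intro x h
    rcases List.pairwise_cons.mp h with ⟨hx, hbt⟩
    rcases List.pairwise_cons.mp hbt with ⟨hb, ht⟩
    simp only [passAux]
    split
    · next hlt =>
      refine List.pairwise_cons.mpr ⟨?_, ih x (List.pairwise_cons.mpr
        ⟨fun z hz => hx z (List.mem_cons_of_mem b hz), ht⟩)⟩
      intro z hz
      rcases List.mem_cons.mp ((passAux_perm scores t x).mem_iff.mp hz) with rfl | hz'
      · intro heq; omega
      · exact hb z hz'
    · next hge =>
      refine List.pairwise_cons.mpr ⟨?_, ih b (List.pairwise_cons.mpr ⟨hb, ht⟩)⟩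
      intro z hz
      rcases List.mem_cons.mp ((passAux_perm scores t b).mem_iff.mp hz) with rfl | hz'
      · exact hx z (by simp)
      · exact hx z (by simp [hz'])

theorem pass_Q (scores : List Int) (l : List Int)
    (h : l.Pairwise (fun a b => skey scores a = skey scores b → a < b)) :
    (pass scores l).Pairwise (fun a b => skey scores a = skey scores b → a < b) := by
  cases l with
  | nil => exact List.Pairwise.nil
  | cons x t => exact passAux_Q scores t x h

theorem iter_Q (scores : List Int) (k : Nat) : ∀ (l : List Int),
    l.Pairwise (fun a b => skey scores a = skey scores b → a < b) →
    ((pass scores)^[k] l).Pairwise (fun a b => skey scores a = skey scores b → a < b) := by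
  induction k with
  | zero => intro l h; simpa using h
  | succ k ih =>
    intro l h
    rw [Function.iterate_succ_apply]
    exact ih (pass scores l) (pass_Q scores l h)

theorem passAux_max (scores : List Int) : ∀ (t : List Int) (x : Int),
    ∃ u m, passAux scores x t = u ++ [m] ∧ ∀ z ∈ x :: t, skey scores z ≤ skey scores m := by
  intro t
  induction t with
  | nil =>
    intro x
    exact ⟨[], x, by simp [passAux], by intro z hz; simp at hz; subst hz; exact le_refl _⟩
  | cons b t ih =>
    intro x
    simp only [passAux]
    split
    · next hlt =>
      rcases ih x with ⟨u, m, he, hm⟩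
      refine ⟨b :: u, m, by simp [he], ?_⟩
      intro z hz
      rcases List.mem_cons.mp hz with rfl | hz'
      · exact hm z (by simp)
      · rcases List.mem_cons.mp hz' with rfl | hz''
        · exact le_trans (le_of_lt hlt) (hm x (by simp))
        · exact hm z (by simp [hz''])
    · next hge =>
      rcases ih b with ⟨u, m, he, hm⟩
      refine ⟨x :: u, m, by simp [he], ?_⟩
      intro z hz
      rcases List.mem_cons.mp hz with rfl | hz'
      · exact le_trans (le_of_not_gt hge) (hm b (by simp))
      · exact hm z hz'

theorem passAux_app (scores : List Int) : ∀ (t : List Int) (x m : Int),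
    (∀ z ∈ x :: t, skey scores z ≤ skey scores m) →
    passAux scores x (t ++ [m]) = passAux scores x t ++ [m] := by
  intro t
  induction t with
  | nil =>
    intro x m h
    have hx : skey scores x ≤ skey scores m := h x (by simp)
    simp only [List.nil_append, passAux]
    rw [if_neg (by omega)]
    rfl
  | cons b t ih =>
    intro x m h
    simp only [List.cons_append, passAux]
    by_cases hc : skey scores b < skey scores x
    · rw [if_pos hc, if_pos hc, ih x m ?_, List.cons_append]
      intro z hz
      rcases List.mem_cons.mp hz with rfl | hz'
      · exact h z (by simp)
      · exact h z (by simp [hz'])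
    · rw [if_neg hc, if_neg hc, ih b m ?_, List.cons_append]
      intro z hz
      rcases List.mem_cons.mp hz with rfl | hz'
      · exact h z (by simp)
      · exact h z (by simp [hz'])

theorem pass_app (scores : List Int) (l : List Int) (m : Int)
    (h : ∀ z ∈ l, skey scores z ≤ skey scores m) :
    pass scores (l ++ [m]) = pass scores l ++ [m] := by
  cases l with
  | nil => rfl
  | cons x t => exact passAux_app scores t x m h

theorem iter_app (scores : List Int) (k : Nat) : ∀ (l : List Int) (m : Int),
    (∀ z ∈ l, skey scores z ≤ skey scores m) →
    (pass scores)^[k] (l ++ [m]) = (pass scores)^[k] l ++ [m] := by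
  induction k with
  | zero => intro l m _; simp
  | succ k ih =>
    intro l m h
    rw [Function.iterate_succ_apply, Function.iterate_succ_apply, pass_app scores l m h]
    exact ih (pass scores l) m (fun z hz => h z ((pass_perm scores l).mem_iff.mp hz))

theorem iter_fix_nil (scores : List Int) (k : Nat) : (pass scores)^[k] [] = ([] : List Int) :=
  Function.iterate_fixed rfl k

theorem iter_sorted (scores : List Int) : ∀ (n : Nat), ∀ (l : List Int), l.length = n →
    ((pass scores)^[n] l).Pairwise (fun a b => skey scores a ≤ skey scores b) := by
  intro n
  induction n using Nat.strong_induction_on with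
  | _ n ih =>
    intro l hl
    cases l with
    | nil => subst hl; simp [iter_fix_nil]
    | cons x t =>
      rcases passAux_max scores t x with ⟨u, m, he, hm⟩
      have hpass : pass scores (x :: t) = u ++ [m] := he
      have hperm : (u ++ [m]).Perm (x :: t) := hpass ▸ pass_perm scores (x :: t)
      have hulen : u.length = t.length := by
        have := hperm.length_eq; simp at this; omega
      have hmem : ∀ z ∈ u, skey scores z ≤ skey scores m := by
        intro z hz
        exact hm z (hperm.mem_iff.mp (by simp [hz]))
      subst hl
      rw [show (x :: t).length = t.length + 1 by simp, Function.iterate_succ_apply, hpass,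
        iter_app scores t.length u m hmem]
      rw [List.pairwise_append]
      refine ⟨?_, by simp, ?_⟩
      · rw [← hulen]
        exact ih u.length (by simp only [List.length_cons]; omega) u rfl
      · intro a ha b hb
        simp at hb; subst hb
        have : a ∈ u := (iter_perm scores t.length u).mem_iff.mp ha
        exact hmem a this

theorem bubble_rlex (scores : List Int) (l : List Int) (h : l.Pairwise (· < ·)) :
    ((pass scores)^[l.length] l).Pairwise (Rlex scores) := by
  have hQ := iter_Q scores l.length l (h.imp (fun hab => fun _ => hab))
  have hS := iter_sorted scores l.length l rfl
  exact (hS.and hQ).imp (fun ⟨hle, hq⟩ => by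
    rcases lt_or_eq_of_le hle with hlt | heq
    · exact Or.inl hlt
    · exact Or.inr ⟨heq, hq heq⟩)

theorem getD_append_self (p : List Int) (x d : Int) (r : List Int) :
    (p ++ x :: r).getD p.length d = x := by simp

theorem getD_append_succ (p : List Int) (x b d : Int) (r : List Int) :
    (p ++ x :: b :: r).getD (p.length + 1) d = b := by
  have : (p ++ x :: b :: r) = (p ++ [x]) ++ b :: r := by simp
  rw [this, show p.length + 1 = (p ++ [x]).length by simp]
  exact getD_append_self (p ++ [x]) b d r

theorem set_append_self (p : List Int) (x v : Int) (r : List Int) :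
    (p ++ x :: r).set p.length v = p ++ v :: r := by
  induction p with
  | nil => simp
  | cons a p ih => simp [ih]

theorem set_append_succ (p : List Int) (x b v : Int) (r : List Int) :
    (p ++ x :: b :: r).set (p.length + 1) v = p ++ x :: v :: r := by
  have h1 : (p ++ x :: b :: r) = (p ++ [x]) ++ b :: r := by simp
  have h2 : (p ++ x :: v :: r) = (p ++ [x]) ++ v :: r := by simp
  rw [h1, h2, show p.length + 1 = (p ++ [x]).length by simp]
  exact set_append_self (p ++ [x]) b v r

-- the index-based inner loop of A is exactly one recursive bubble pass
theorem innerFold_eq (scores : List Int) : ∀ (t p : List Int) (x : Int),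
    (PySem.List.pyRange (p.length : Int) ((p.length : Int) + t.length) 1).foldl (fun rv j =>
      if PySem.List.pyGetD scores (PySem.List.pyGetD rv (j + 1) 0) 0 < PySem.List.pyGetD scores (PySem.List.pyGetD rv j 0) 0 then
        PySem.List.pySetD (PySem.List.pySetD rv (j + 1) (PySem.List.pyGetD rv j 0)) j (PySem.List.pyGetD rv (j + 1) 0)
      else rv) (p ++ x :: t) = p ++ passAux scores x t := by
  intro t
  induction t with
  | nil =>
    intro p x
    rw [PySem.List.pyRange_one_eq_nil (by simp)]
    simp [passAux]
  | cons b t ih =>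
    intro p x
    have hcons := PySem.List.pyRange_one_cons
      (a := (p.length : Int)) (b := (p.length : Int) + (b :: t).length)
      (by simp only [List.length_cons]; omega)
    rw [hcons, List.foldl_cons]
    have hg0 : PySem.List.pyGetD (p ++ x :: b :: t) (p.length : Int) 0 = x := by
      rw [PySem.List.pyGetD_natCast]; exact getD_append_self p x 0 (b :: t)
    have hg1 : PySem.List.pyGetD (p ++ x :: b :: t) ((p.length : Int) + 1) 0 = b := by
      rw [show ((p.length : Int) + 1) = ((p.length + 1 : Nat) : Int) by push_cast; ring,
        PySem.List.pyGetD_natCast]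
      exact getD_append_succ p x b 0 t
    simp only [hg0, hg1]
    by_cases hc : PySem.List.pyGetD scores b 0 < PySem.List.pyGetD scores x 0
    · rw [if_pos hc]
      have hset : PySem.List.pySetD (PySem.List.pySetD (p ++ x :: b :: t) ((p.length : Int) + 1) x)
          (p.length : Int) b = p ++ b :: x :: t := by
        rw [show ((p.length : Int) + 1) = ((p.length + 1 : Nat) : Int) by
          simp only [Nat.cast_add, Nat.cast_one]]
        simp only [PySem.List.pySetD_natCast]
        rw [set_append_succ, set_append_self]
      rw [hset]
      have hb1 : ((p.length : Int) + 1) = (((p ++ [b]).length : Nat) : Int) := by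
        simp only [List.length_append, List.length_cons, List.length_nil]; omega
      have hb2 : (p.length : Int) + ((b :: t).length : Int) = (((p ++ [b]).length : Nat) : Int) + (t.length : Int) := by
        simp only [List.length_append, List.length_cons, List.length_nil]; omega
      have haux : passAux scores x (b :: t) = b :: passAux scores x t := by
        simp only [passAux, skey]
        rw [if_pos hc]
      rw [show p ++ b :: x :: t = (p ++ [b]) ++ x :: t by simp, hb1, hb2, ih (p ++ [b]) x, haux]
      simp
    · rw [if_neg hc]
      have hb1 : ((p.length : Int) + 1) = (((p ++ [x]).length : Nat) : Int) := by
        simp only [List.length_append, List.length_cons, List.length_nil]; omega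
      have hb2 : (p.length : Int) + ((b :: t).length : Int) = (((p ++ [x]).length : Nat) : Int) + (t.length : Int) := by
        simp only [List.length_append, List.length_cons, List.length_nil]; omega
      have haux : passAux scores x (b :: t) = x :: passAux scores b t := by
        simp only [passAux, skey]
        rw [if_neg hc]
      rw [show p ++ x :: b :: t = (p ++ [x]) ++ b :: t by simp, hb1, hb2, ih (p ++ [x]) b, haux]
      simp

theorem pass_fold_eq (scores : List Int) (rv : List Int) :
    (PySem.List.pyRange 0 ((rv.length : Int) - 1) 1).foldl (fun rv j =>
      if PySem.List.pyGetD scores (PySem.List.pyGetD rv (j + 1) 0) 0 < PySem.List.pyGetD scores (PySem.List.pyGetD rv j 0) 0 then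
        PySem.List.pySetD (PySem.List.pySetD rv (j + 1) (PySem.List.pyGetD rv j 0)) j (PySem.List.pyGetD rv (j + 1) 0)
      else rv) rv = pass scores rv := by
  cases rv with
  | nil => rw [PySem.List.pyRange_one_eq_nil (by simp)]; rfl
  | cons x t =>
    have h := innerFold_eq scores t [] x
    simp only [List.nil_append, List.length_nil, Nat.cast_zero, zero_add] at h
    rw [show ((x :: t).length : Int) - 1 = (t.length : Int) by
      simp only [List.length_cons]; omega]
    exact h

theorem foldl_iterate {α β : Type} (f : α → α) (l : List β) (s : α) :
    l.foldl (fun s _ => f s) s = f^[l.length] s := by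
  induction l generalizing s with
  | nil => rfl
  | cons b l ih => simp [List.foldl_cons, ih, Function.iterate_succ_apply]

-- stability of the library sort: inserting a largest-index element keeps (score, index)-strict order
theorem insertBy_rlex (scores : List Int) : ∀ (ys : List Int) (x : Int),
    ys.Pairwise (Rlex scores) → (∀ y ∈ ys, y < x) →
    (PySem.List.insertBy (fun a b => decide (PySem.List.pyGetD scores a 0 < PySem.List.pyGetD scores b 0)) x ys).Pairwise (Rlex scores) := by
  intro ys
  induction ys with
  | nil => intro x _ _; simp [PySem.List.insertBy]
  | cons y t ih =>
    intro x hp hlt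
    rcases List.pairwise_cons.mp hp with ⟨hy, ht⟩
    simp only [PySem.List.insertBy]
    split
    · next hcond =>
      have hxy : skey scores x < skey scores y := by simpa [skey] using hcond
      refine List.pairwise_cons.mpr ⟨?_, hp⟩
      intro z hz
      rcases List.mem_cons.mp hz with rfl | hz'
      · exact Or.inl hxy
      · have := hy z hz'
        rcases this with h1 | ⟨h1, _⟩
        · exact Or.inl (lt_trans hxy h1)
        · exact Or.inl (by omega)
    · next hcond =>
      have hyx : ¬ skey scores x < skey scores y := by simpa [skey] using hcond
      refine List.pairwise_cons.mpr ⟨?_, ih x ht (fun z hz => hlt z (by simp [hz]))⟩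
      intro z hz
      rcases (PySem.List.mem_insertBy _ x z t).mp hz with rfl | hz'
      · by_cases he : skey scores y < skey scores z
        · exact Or.inl he
        · exact Or.inr ⟨by omega, hlt y (by simp)⟩
      · exact hy z hz'

theorem sorted_fold_rlex (scores : List Int) : ∀ (xs acc : List Int),
    acc.Pairwise (Rlex scores) → (∀ y ∈ acc, ∀ x ∈ xs, y < x) → xs.Pairwise (· < ·) →
    (xs.foldl (fun acc x => PySem.List.insertBy
      (fun a b => decide (PySem.List.pyGetD scores a 0 < PySem.List.pyGetD scores b 0)) x acc) acc).Pairwise (Rlex scores) := by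
  intro xs
  induction xs with
  | nil => intro acc h _ _; simpa using h
  | cons x rest ih =>
    intro acc h hcross hxs
    rcases List.pairwise_cons.mp hxs with ⟨hx, hrest⟩
    rw [List.foldl_cons]
    refine ih _ (insertBy_rlex scores acc x h (fun y hy => hcross y hy x (by simp))) ?_ hrest
    intro y hy x' hx'
    rcases (PySem.List.mem_insertBy _ x y acc).mp hy with rfl | hy'
    · exact hx x' hx'
    · exact hcross y hy' x' (by simp [hx'])

theorem sorted_rlex (scores : List Int) (xs : List Int) (h : xs.Pairwise (· < ·)) :
    (PySem.List.sorted xs (fun i => PySem.List.pyGetD scores i 0) false).Pairwise (Rlex scores) := by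
  rw [PySem.List.sorted_eq_foldl_insertBy]
  exact sorted_fold_rlex scores xs [] (by simp) (by simp) h

-- the running-argmax loop of A: the result's score dominates the initial index's and every scanned index's
theorem argmax_fold (scores : List Int) : ∀ (l : List Int) (a : Int),
    skey scores a ≤ skey scores (l.foldl (fun mx i => if PySem.List.pyGetD scores mx 0 < PySem.List.pyGetD scores i 0 then i else mx) a) ∧
    (∀ i ∈ l, skey scores i ≤ skey scores (l.foldl (fun mx i => if PySem.List.pyGetD scores mx 0 < PySem.List.pyGetD scores i 0 then i else mx) a)) ∧
    (l.foldl (fun mx i => if PySem.List.pyGetD scores mx 0 < PySem.List.pyGetD scores i 0 then i else mx) a = a ∨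
      l.foldl (fun mx i => if PySem.List.pyGetD scores mx 0 < PySem.List.pyGetD scores i 0 then i else mx) a ∈ l) := by
  intro l
  induction l with
  | nil => intro a; simp
  | cons i l ih =>
    intro a
    rw [List.foldl_cons]
    rcases ih (if PySem.List.pyGetD scores a 0 < PySem.List.pyGetD scores i 0 then i else a) with ⟨h1, h2, h3⟩
    by_cases hc : PySem.List.pyGetD scores a 0 < PySem.List.pyGetD scores i 0
    · rw [if_pos hc] at h1 h2 h3 ⊢
      refine ⟨le_trans (le_of_lt hc) h1, ?_, ?_⟩
      · intro j hj
        rcases List.mem_cons.mp hj with rfl | hj'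
        · exact h1
        · exact h2 j hj'
      · rcases h3 with h3 | h3
        · exact Or.inr (by simp [h3])
        · exact Or.inr (by simp [h3])
    · rw [if_neg hc] at h1 h2 h3 ⊢
      refine ⟨h1, ?_, ?_⟩
      · intro j hj
        rcases List.mem_cons.mp hj with rfl | hj'
        · exact le_trans (not_lt.mp hc) h1
        · exact h2 j hj'
      · rcases h3 with h3 | h3
        · exact Or.inl h3
        · exact Or.inr (by simp [h3])

-- a fold whose step returns either the accumulator or the element stays in {init} ∪ l
theorem foldl_sel_mem (f : Int → Int → Int) (hf : ∀ a i, f a i = a ∨ f a i = i) :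
    ∀ (l : List Int) (a : Int), l.foldl f a = a ∨ l.foldl f a ∈ l := by
  intro l
  induction l with
  | nil => intro a; simp
  | cons i l ih =>
    intro a
    rw [List.foldl_cons]
    rcases ih (f a i) with h | h
    · rcases hf a i with h' | h'
      · exact Or.inl (h.trans h')
      · rw [h, h']
        exact Or.inr (by simp)
    · exact Or.inr (List.mem_cons_of_mem i h)

theorem pairwise_le_getLast (scores : List Int) : ∀ (l : List Int) (h : l ≠ []),
    l.Pairwise (fun a b => skey scores a ≤ skey scores b) →
    ∀ x ∈ l, skey scores x ≤ skey scores (l.getLast h) := by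
  intro l
  induction l with
  | nil => intro h; exact absurd rfl h
  | cons a t ih =>
    intro h hp x hx
    rcases List.pairwise_cons.mp hp with ⟨ha, ht⟩
    cases t with
    | nil => simp at hx; subst hx; simp
    | cons b t' =>
      rw [List.getLast_cons (by simp)]
      rcases List.mem_cons.mp hx with rfl | hx'
      · exact ha _ (List.getLast_mem (by simp))
      · exact ih (by simp) ht x hx'

-- B's while-loop followed by the slice is dropWhile on the sorted order
theorem ebScan_dropWhile (scores : List Int) (th : Int) : ∀ (fuel : Nat) (order : List Int) (k : Nat),
    order.length - k ≤ fuel →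
    order.drop (ebScan scores th order k) =
      (order.drop k).dropWhile (fun i => decide (PySem.List.pyGetD scores i 0 ≤ th)) := by
  intro fuel
  induction fuel with
  | zero =>
    intro order k hk
    have hlen : order.length ≤ k := by omega
    rw [ebScan, dif_neg (by omega)]
    rw [List.drop_of_length_le hlen]
    rfl
  | succ fuel ih =>
    intro order k hk
    rw [ebScan]
    by_cases hklen : k < order.length
    · rw [dif_pos hklen]
      have hdrop : order.drop k = order[k] :: order.drop (k + 1) := List.drop_eq_getElem_cons hklen
      have hgk : PySem.List.pyGetD order (k : Int) 0 = order[k] := by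
        rw [PySem.List.pyGetD_natCast, List.getD_eq_getElem?_getD, List.getElem?_eq_getElem hklen]
        rfl
      by_cases hc : PySem.List.pyGetD scores (PySem.List.pyGetD order (k : Int) 0) 0 ≤ th
      · rw [if_pos hc, ih order (k + 1) (by omega), hdrop, List.dropWhile_cons]
        rw [hgk] at hc
        simp [hc]
      · rw [if_neg hc, hdrop, List.dropWhile_cons]
        rw [hgk] at hc
        simp [hc]
    · rw [dif_neg hklen]
      rw [List.drop_of_length_le (by omega)]
      rfl

theorem sorted_dropWhile_eq_filter (scores : List Int) (th : Int) : ∀ (l : List Int),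
    l.Pairwise (fun a b => PySem.List.pyGetD scores a 0 ≤ PySem.List.pyGetD scores b 0) →
    l.dropWhile (fun i => decide (PySem.List.pyGetD scores i 0 ≤ th)) =
      l.filter (fun i => decide (th < PySem.List.pyGetD scores i 0)) := by
  intro l
  induction l with
  | nil => intro _; rfl
  | cons a t ih =>
    intro hp
    rcases List.pairwise_cons.mp hp with ⟨ha, ht⟩
    rw [List.dropWhile_cons, List.filter_cons]
    by_cases hc : PySem.List.pyGetD scores a 0 ≤ th
    · rw [if_pos (by simpa using hc), if_neg (by simpa using (by omega : ¬ th < PySem.List.pyGetD scores a 0))]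
      exact ih ht
    · rw [if_neg (by simpa using hc), if_pos (by simpa using (by omega : th < PySem.List.pyGetD scores a 0))]
      congr 1
      symm
      rw [List.filter_eq_self]
      intro b hb
      have := ha b hb
      simp only [decide_eq_true_eq]
      omega

theorem ebScan_drop0 (scores : List Int) (th : Int) (order : List Int) :
    order.drop (ebScan scores th order 0) =
      order.dropWhile (fun i => decide (PySem.List.pyGetD scores i 0 ≤ th)) := by
  rw [ebScan_dropWhile scores th order.length order 0 (by omega), List.drop_zero]

-- the score at A's argmax index equals the score at the last index of B's sorted order
theorem max_eq_last (scores : List Int) (hs : scores ≠ []) (mn : Int)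
    (hmn : mn = 0 ∨ mn ∈ PySem.List.pyRange 0 ((scores.length : Int)) 1) :
    PySem.List.pyGetD scores ((PySem.List.pyRange 0 ((scores.length : Int)) 1).foldl
      (fun mx i => if PySem.List.pyGetD scores mx 0 < PySem.List.pyGetD scores i 0 then i else mx) mn) 0 =
    PySem.List.pyGetD scores (PySem.List.pyGetD (PySem.List.sorted
      (PySem.List.pyRange 0 ((scores.length : Int)) 1) (fun i => PySem.List.pyGetD scores i 0) false) (-1) 0) 0 := by
  have hn0 : 0 < scores.length := List.length_pos_iff.mpr hs
  obtain ⟨h1, h2, h3⟩ := argmax_fold scores (PySem.List.pyRange 0 ((scores.length : Int)) 1) mn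
  have horder_perm := PySem.List.sorted_perm (PySem.List.pyRange 0 ((scores.length : Int)) 1)
    (fun i => PySem.List.pyGetD scores i 0) false
  have horder_ne : PySem.List.sorted (PySem.List.pyRange 0 ((scores.length : Int)) 1)
      (fun i => PySem.List.pyGetD scores i 0) false ≠ [] := by
    rw [Ne, PySem.List.sorted_eq_nil_iff]
    intro hnil
    have hz := congrArg List.length hnil
    rw [PySem.List.length_pyRange_one] at hz
    simp only [List.length_nil, sub_zero, Int.toNat_eq_zero] at hz
    omega
  rw [PySem.List.pyGetD_neg_one _ 0 horder_ne]
  have h0mem : (0 : Int) ∈ PySem.List.pyRange 0 ((scores.length : Int)) 1 :=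
    PySem.List.mem_pyRange_one.mpr ⟨le_refl 0, by omega⟩
  have hmnmem : mn ∈ PySem.List.pyRange 0 ((scores.length : Int)) 1 := by
    rcases hmn with rfl | h
    · exact h0mem
    · exact h
  have hmxmem : (PySem.List.pyRange 0 ((scores.length : Int)) 1).foldl
      (fun mx i => if PySem.List.pyGetD scores mx 0 < PySem.List.pyGetD scores i 0 then i else mx) mn ∈
      PySem.List.pyRange 0 ((scores.length : Int)) 1 := by
    rcases h3 with h | h
    · rw [h]; exact hmnmem
    · exact h
  apply le_antisymm
  · exact pairwise_le_getLast scores _ horder_ne (PySem.List.sorted_pairwise _ _) _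
      (horder_perm.mem_iff.mpr hmxmem)
  · exact h2 _ (horder_perm.mem_iff.mp (List.getLast_mem horder_ne))

theorem rlex_antisymm (scores : List Int) (a b : Int) :
    Rlex scores a b → Rlex scores b a → a = b := by
  intro h1 h2
  rcases h1 with h1 | ⟨h1, h1'⟩ <;> rcases h2 with h2 | ⟨h2, h2'⟩ <;> omega

-- ===== VERDICT (by name: the statement is the Claim_ definition above) =====
theorem estimatedBest_spec : Claim_equal_estimatedBest := by
  intro decoded_texts scores _
  unfold Spec_estimatedBest
  by_cases hs : scores = []
  · subst hs; rfl
  · simp only [estimatedBest, estimatedBest_alt, if_neg hs, gt_iff_lt]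
    rw [PySem.List.foldl_append_ite_eq_filter, List.nil_append]
    rw [foldl_iterate]
    rw [funext (pass_fold_eq scores)]
    rw [PySem.List.length_pyRange_one]
    simp only [sub_zero, Int.toNat_natCast]
    rw [PySem.List.slice_from_natCast]
    rw [ebScan_drop0]
    rw [sorted_dropWhile_eq_filter scores _ _ (PySem.List.sorted_pairwise _ _)]
    have hmn := foldl_sel_mem
      (fun mn i => if PySem.List.pyGetD scores i 0 < PySem.List.pyGetD scores mn 0 then i else mn)
      (fun a i => by
        by_cases h : PySem.List.pyGetD scores i 0 < PySem.List.pyGetD scores a 0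
        · simp [h]
        · simp [h])
      (PySem.List.pyRange 0 ((scores.length : Int)) 1) 0
    rw [max_eq_last scores hs _ hmn]
    refine List.eq_of_perm_of_sorted (fun a b _ _ h1 h2 => rlex_antisymm scores a b h1 h2) ?_ ?_ ?_
    · exact bubble_rlex scores _ ((PySem.List.pairwise_lt_pyRange_one 0 _).filter _)
    · exact (sorted_rlex scores _ (PySem.List.pairwise_lt_pyRange_one 0 _)).filter _
    · exact (iter_perm scores _ _).trans ((PySem.List.sorted_perm _ _ _).filter _).symm
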